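-- pv_equiv track=rewrite | github.com/permCoding/ege-26 | tasks/examples/aprob-04-03-2026-2/14.py | f
-- ===== SOURCE A (Python) =====
-- def f(s):
--     s = s[::-1]
--     p = 0
--     result = 0
--     for elm in s:
--         result += al.index(elm) * 22**p
--         p += 1
--     return result
--
-- al = '0123456789'
-- ===== SOURCE B (Python) =====
-- def f(s):
--     result = 0
--     for elm in s:
--         result = result * 22 + al.index(elm)
--     return result
--
-- al = '0123456789'
-- ===== Notes on version B (the rewrite author's own statement) =====
-- stated objective: idiomatic
-- what changed: B replaces A's reverse-the-string pass with an explicit power accumulator (22**p) by Horner's method over the original string, maintaining only one running accumulator multiplied by 22 per character.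
import Mathlib
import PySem

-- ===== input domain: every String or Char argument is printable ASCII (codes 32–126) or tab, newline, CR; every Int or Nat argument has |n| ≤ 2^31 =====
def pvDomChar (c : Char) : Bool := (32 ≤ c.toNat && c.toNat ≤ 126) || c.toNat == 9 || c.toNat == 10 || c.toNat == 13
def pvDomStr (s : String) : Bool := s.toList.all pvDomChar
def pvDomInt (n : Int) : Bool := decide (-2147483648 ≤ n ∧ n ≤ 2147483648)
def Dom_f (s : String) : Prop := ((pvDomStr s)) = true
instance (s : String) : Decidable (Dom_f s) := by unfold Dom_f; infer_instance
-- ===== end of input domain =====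

-- B parses by Horner's method over the original string (one accumulator, ×22 per char),
-- instead of A's reversal plus an explicit 22**p power accumulator; same values everywhere A returns.

def pvAl : List Char := ['0','1','2','3','4','5','6','7','8','9']   -- al = '0123456789'

-- ===== PORT A =====
-- al.index(elm): on Pre_f the character is present, so index? is some; getD 0 is never the
-- fallback there (Python raises ValueError outside Pre_f, which Pre_f excludes).
def f (s : String) : Int :=
  let rev := (PySem.List.slice? s.toList none none (-1)).getD []   -- s = s[::-1]
  (rev.foldl (fun (st : Nat × Int) elm =>
      (st.1 + 1, st.2 + ((PySem.List.index? pvAl elm).getD 0 : Int) * 22 ^ st.1))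
    (0, 0)).2

-- ===== PORT B =====
def f_alt (s : String) : Int :=
  s.toList.foldl (fun result elm => result * 22 + ((PySem.List.index? pvAl elm).getD 0 : Int)) 0

-- ===== PRECONDITION & SPEC =====
-- Pre_f: every character occurs in al — exactly where Python's al.index does not raise ValueError.
def Pre_f (s : String) : Prop := s.toList.all (· ∈ pvAl) = true
instance (s : String) : Decidable (Pre_f s) := by unfold Pre_f; infer_instance
def pvWitness_f : String := "07"
def Spec_f (s : String) (out : Int) : Prop := out = f_alt s
instance (s : String) (out : Int) : Decidable (Spec_f s out) := by unfold Spec_f; infer_instance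

-- ===== CLAIM (what is proved, stated in full; the proofs are below) =====
def Claim_equal_f : Prop := ∀ (s : String), Dom_f s → Pre_f s → Spec_f s (f s)

-- ===== LEMMAS AND PROOFS =====

-- B's fold from an arbitrary accumulator
lemma pvHorner (l : List Char) (r0 : Int) :
    l.foldl (fun result elm => result * 22 + ((PySem.List.index? pvAl elm).getD 0 : Int)) r0
      = r0 * 22 ^ l.length +
        l.foldl (fun result elm => result * 22 + ((PySem.List.index? pvAl elm).getD 0 : Int)) 0 := by
  induction l generalizing r0 with
  | nil => simp
  | cons a t ih =>
      simp only [List.foldl_cons, List.length_cons]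
      rw [ih (r0 * 22 + _), ih (0 * 22 + _)]
      ring

-- A's fold over the reversed list, from an arbitrary state
lemma pvRevFold (l : List Char) (p : Nat) (r : Int) :
    l.reverse.foldl (fun (st : Nat × Int) elm =>
        (st.1 + 1, st.2 + ((PySem.List.index? pvAl elm).getD 0 : Int) * 22 ^ st.1)) (p, r)
      = (p + l.length,
         r + 22 ^ p *
           l.foldl (fun result elm => result * 22 + ((PySem.List.index? pvAl elm).getD 0 : Int)) 0) := by
  induction l generalizing p r with
  | nil => simp
  | cons a t ih =>
      simp only [List.reverse_cons, List.foldl_append, List.foldl_cons, List.foldl_nil,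
        List.length_cons, ih]
      rw [pvHorner t (0 * 22 + _)]
      refine Prod.ext (by omega) ?_
      simp only [pow_add]
      ring

-- ===== VERDICT (by name: the statement is the Claim_ definition above) =====
theorem f_spec : Claim_equal_f := by
  intro s _ _
  unfold Spec_f f f_alt
  rw [PySem.List.slice?_none_none_neg_one]
  simp only [Option.getD_some, pvRevFold]
  ring
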